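-- pv_equiv track=rewrite | github.com/happbob/algorithm-python | 프로그래머스/1/1845. 폰켓몬/폰켓몬.py | solution
-- ===== SOURCE A (Python) =====
-- from collections import deque
--
-- def solution(nums):
--     answer = 0
--     arr = deque()
--     for i in nums:
--         if(i not in arr):
--             arr.appendleft(i)
--             answer += 1
--         if(answer == len(nums)//2):
--             break
--     return answer
-- ===== SOURCE B (Python) =====
-- def solution(nums):
--     s = sorted(nums)
--     count = 0
--     prev = None
--     for x in s:
--         if prev is None or x != prev:
--             count += 1
--         prev = x
--     return min(count, len(nums) // 2)
-- ===== Notes on version B (the rewrite author's own statement) =====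
-- stated objective: faster
-- what changed: Replaces A's loop with a per-element O(n) deque membership scan by sort-then-one-adjacent-comparison pass, returning min(distinct, len//2) explicitly.
-- intended difference: On single-element lists A's break check (answer == len(nums)//2 == 0) never fires so A returns 1, while B returns the intended cap min(1, 0) = 0, the number of pokemons one may actually pick. — e.g. on solution([5]): A returns 1, B returns 0
import Mathlib
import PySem

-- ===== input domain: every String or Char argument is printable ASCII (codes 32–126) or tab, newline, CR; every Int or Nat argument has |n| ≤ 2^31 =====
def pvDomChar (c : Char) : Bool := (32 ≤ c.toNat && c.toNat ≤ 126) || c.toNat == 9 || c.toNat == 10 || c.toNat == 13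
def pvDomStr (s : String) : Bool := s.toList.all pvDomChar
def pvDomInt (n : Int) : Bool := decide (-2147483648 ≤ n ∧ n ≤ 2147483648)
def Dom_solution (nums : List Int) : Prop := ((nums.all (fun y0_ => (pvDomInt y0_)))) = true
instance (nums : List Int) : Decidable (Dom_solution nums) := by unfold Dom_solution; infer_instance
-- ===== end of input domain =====

-- B replaces A's deque-membership scan loop by sort + one adjacent-comparison pass with an explicit min cap (simpler).

-- ===== PORT A =====
-- the for-loop: state (answer, arr); deque appendleft = cons; 'break' = return answer now
def solutionLoop (rest : List Int) (half : Int) (answer : Int) (arr : List Int) : Int :=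
  match rest with
  | [] => answer
  | i :: rest' =>
    if ¬ arr.contains i then
      -- i not in arr: appendleft, answer += 1, then the break check
      if answer + 1 = half then answer + 1 else solutionLoop rest' half (answer + 1) (i :: arr)
    else
      -- duplicate: state unchanged, then the break check
      if answer = half then answer else solutionLoop rest' half answer arr

def solution (nums : List Int) : Int :=
  solutionLoop nums (PySem.Int.floordiv (nums.length : Int) 2) 0 []

-- ===== PORT B =====
-- the for-loop of Source B after the first element (prev is no longer None)
def altGo (prev : Int) (rest : List Int) : Int :=
  match rest with
  | [] => 0
  | x :: rest' => (if x ≠ prev then 1 else 0) + altGo x rest'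

-- count over the whole sorted list: first element always counts (prev is None)
def altCount (s : List Int) : Int :=
  match s with
  | [] => 0
  | x :: rest => 1 + altGo x rest

def solution_alt (nums : List Int) : Int :=
  min (altCount (PySem.List.sorted nums (fun x => x) false)) (PySem.Int.floordiv (nums.length : Int) 2)

-- ===== PRECONDITION & SPEC =====
-- On single-element lists A's break check (answer == len(nums)//2 == 0) never fires, so A returns 1;
-- B returns the intended cap min(1, 0) = 0, the number of pokemons one may actually pick.
def D_solution (nums : List Int) : Prop := nums.length = 1
instance (nums : List Int) : Decidable (D_solution nums) := by unfold D_solution; infer_instance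
def Spec_solution (nums : List Int) (out : Int) : Prop := ¬ D_solution nums → out = solution_alt nums
instance (nums : List Int) (out : Int) : Decidable (Spec_solution nums out) := by unfold Spec_solution; infer_instance
def pvDiffWitness_solution : List Int := [5]
def pvDiffWitnessOut_solution : Int × Int := (1, 0)

-- ===== CLAIM (what is proved, stated in full; the proofs are below) =====
def Claim_unchanged_solution : Prop := ∀ (nums : List Int), Dom_solution nums → Spec_solution nums (solution nums)
def Claim_changed_solution : Prop := Dom_solution (pvDiffWitness_solution) ∧ D_solution (pvDiffWitness_solution) ∧ solution (pvDiffWitness_solution) = pvDiffWitnessOut_solution.1 ∧ solution_alt (pvDiffWitness_solution) = pvDiffWitnessOut_solution.2 ∧ pvDiffWitnessOut_solution.1 ≠ pvDiffWitnessOut_solution.2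
def Claim_exact_solution : Prop := ∀ (nums : List Int), Dom_solution nums → D_solution nums → solution nums ≠ solution_alt nums

-- ===== LEMMAS AND PROOFS =====

-- number of NEW distinct elements A's loop would add, ignoring the break
def newDistinct (arr : List Int) (l : List Int) : Nat :=
  match l with
  | [] => 0
  | i :: rest => if arr.contains i then newDistinct arr rest else 1 + newDistinct (i :: arr) rest

lemma newDistinct_card (l arr : List Int) :
    (newDistinct arr l : Int) = ((l.toFinset \ arr.toFinset).card : Int) := by
  induction l generalizing arr with
  | nil => simp [newDistinct]
  | cons i rest ih =>
    rw [newDistinct]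
    by_cases h : arr.contains i
    · have hi : i ∈ arr.toFinset := by simpa using h
      rw [if_pos h, ih, List.toFinset_cons, Finset.insert_sdiff_of_mem _ hi]
    · have hi : i ∉ arr.toFinset := by simpa using h
      have e1 : insert i rest.toFinset \ arr.toFinset = insert i (rest.toFinset \ arr.toFinset) :=
        Finset.insert_sdiff_of_notMem _ hi
      have e2 : rest.toFinset \ (i :: arr).toFinset = (rest.toFinset \ arr.toFinset).erase i := by
        rw [List.toFinset_cons, Finset.sdiff_insert]
      have e3 : (insert i (rest.toFinset \ arr.toFinset)).card
          = ((rest.toFinset \ arr.toFinset).erase i).card + 1 := by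
        rw [← Finset.card_erase_add_one (s := insert i (rest.toFinset \ arr.toFinset))
            (a := i) (Finset.mem_insert_self _ _), Finset.erase_insert_eq_erase]
      rw [if_neg h, List.toFinset_cons, e1, e3]
      push_cast [ih, e2]
      omega

-- A's loop, started strictly below the cap, returns min(answer + new distinct, half)
lemma solutionLoop_eq (l : List Int) (half : Int) : ∀ (answer : Int) (arr : List Int),
    answer < half →
    solutionLoop l half answer arr = min (answer + (newDistinct arr l : Int)) half := by
  induction l with
  | nil => intro answer arr h; rw [solutionLoop, newDistinct]; omega
  | cons i rest ih =>
    intro answer arr h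
    rw [solutionLoop, newDistinct]
    by_cases hc : arr.contains i
    · rw [if_neg (by simpa using hc), if_pos hc, if_neg (by omega), ih answer arr h]
    · rw [if_pos (by simpa using hc), if_neg hc]
      by_cases hh : answer + 1 = half
      · rw [if_pos hh]; omega
      · rw [if_neg hh, ih (answer + 1) (i :: arr) (by omega)]; omega

-- B's inner pass on a sorted tail counts the fresh values
lemma altGo_card (l : List Int) : ∀ (prev : Int),
    l.Pairwise (· ≤ ·) → (∀ y ∈ l, prev ≤ y) →
    altGo prev l + 1 = ((insert prev l.toFinset).card : Int) := by
  induction l with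
  | nil => intro prev _ _; simp [altGo]
  | cons x rest ih =>
    intro prev hp hle
    have hp' : rest.Pairwise (· ≤ ·) := hp.of_cons
    have hxle : ∀ y ∈ rest, x ≤ y := fun y hy => (List.pairwise_cons.1 hp).1 y hy
    have ihx := ih x hp' hxle
    rw [altGo]
    by_cases hx : x = prev
    · subst hx
      rw [if_neg (by simp), List.toFinset_cons, Finset.insert_idem]
      omega
    · have hpx : prev < x := lt_of_le_of_ne (hle x (by simp)) (Ne.symm hx)
      have hnm : prev ∉ insert x rest.toFinset := by
        simp only [Finset.mem_insert, List.mem_toFinset]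
        rintro (rfl | hmem)
        · exact hx rfl
        · exact absurd (hxle _ hmem) (by omega)
      rw [if_pos (by simpa using hx), List.toFinset_cons,
        Finset.card_insert_of_notMem hnm]
      push_cast
      omega

lemma altCount_card (nums : List Int) :
    altCount (PySem.List.sorted nums (fun x => x) false) = (nums.toFinset.card : Int) := by
  have hperm : (PySem.List.sorted nums (fun x => x) false).Perm nums := PySem.List.sorted_perm ..
  have hfin : (PySem.List.sorted nums (fun x => x) false).toFinset = nums.toFinset :=
    List.toFinset_eq_of_perm _ _ hperm
  have hpw : (PySem.List.sorted nums (fun x => x) false).Pairwise (· ≤ ·) := by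
    simpa using PySem.List.sorted_pairwise (xs := nums) (key := fun x => x)
  cases hs : PySem.List.sorted nums (fun x => x) false with
  | nil =>
    have : nums.toFinset = ∅ := by rw [← hfin, hs]; simp
    rw [altCount, this]; simp
  | cons x rest =>
    rw [hs] at hpw hfin
    have hle : ∀ y ∈ rest, x ≤ y := fun y hy => (List.pairwise_cons.1 hpw).1 y hy
    have := altGo_card rest x hpw.of_cons hle
    rw [altCount, ← hfin, List.toFinset_cons]
    omega

-- ===== VERDICT (by name: the statement is the Claim_ definition above) =====
theorem solution_spec : Claim_unchanged_solution := by
  intro nums _ hD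
  match nums with
  | [] => decide
  | a :: rest =>
    have hne : rest ≠ [] := fun h => hD (by simp [D_solution, h])
    have hlen2 : 2 ≤ ((a :: rest).length : Int) := by
      cases rest with
      | nil => exact absurd rfl hne
      | cons b t => simp; omega
    have hhalf : (0 : Int) < PySem.Int.floordiv ((a :: rest).length : Int) 2 := by
      rw [PySem.Int.floordiv_eq_ediv_of_pos (by omega)]
      omega
    show solution (a :: rest) = solution_alt (a :: rest)
    rw [solution, solution_alt, solutionLoop_eq _ _ 0 [] hhalf, altCount_card,
      newDistinct_card]
    simp

theorem solution_changed : Claim_changed_solution := by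
  unfold Claim_changed_solution; decide

theorem solution_tight : Claim_exact_solution := by
  intro nums _ hD
  unfold D_solution at hD
  match nums with
  | [a] =>
    show solution [a] ≠ solution_alt [a]
    have h1 : solution [a] = 1 := by
      rw [solution, solutionLoop]
      norm_num [PySem.Int.floordiv, solutionLoop]
    have h2 : solution_alt [a] = 0 := by
      rw [solution_alt]
      have : PySem.List.sorted [a] (fun x => x) false = [a] :=
        PySem.List.sorted_eq_of_perm_of_pairwise_lt _ _ _ (List.Perm.refl _)
          (List.pairwise_singleton _ _)
      rw [this, altCount, altGo]
      norm_num [PySem.Int.floordiv]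
      decide
    rw [h1, h2]; decide
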